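-- pv_equiv track=rewrite | github.com/tenstorrent/tt-inference-server | workflows/local_preconditions.py | categorize_environment_variables
-- ===== SOURCE A (Python) =====
-- from typing import Dict, Any, Optional, List
--
-- def categorize_environment_variables(env_vars: Dict[str, str]) -> Dict[str, List[str]]:
--     """Categorize ALL environment variables into logical debugging categories.
--
--     Args:
--         env_vars: Dictionary of all environment variables
--
--     Returns:
--         Dict with comprehensive categories for all variables
--     """
--     categories = {
--         "tt_inference_system": [],      # TT-Metal, vLLM, models, inference-specific
--         "development_environment": [], # Python, development tools, paths
--         "container_runtime": [],       # Docker, container-specific variables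
--         "system_core": [],            # Core OS, shell, user environment
--         "authentication_secrets": [], # Tokens, keys, credentials
--         "other_applications": []      # Everything else
--     }
--
--     for var_name in env_vars.keys():
--         var_upper = var_name.upper()
--
--         # TT-Inference System: Hardware, models, inference frameworks
--         if any(pattern in var_upper for pattern in [
--             'TT_', 'VLLM_', 'HF_', 'MODEL_', 'LLAMA_', 'MESH_', 'ARCH_',
--             'CACHE_', 'WH_', 'INFERENCE_', 'GPU_', 'CUDA_'
--         ]):
--             categories["tt_inference_system"].append(var_name)
--
--         # Development Environment: Python, build tools, development
--         elif any(pattern in var_upper for pattern in [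
--             'PYTHON', 'PIP_', 'CONDA_', 'VIRTUAL_', 'VENV', '_ENV',
--             'GCC_', 'CC_', 'CXX_', 'CMAKE_', 'PKG_CONFIG', 'LIBRARY_',
--             'INCLUDE_', 'LD_', 'LOGURU_', 'CONFIG'
--         ]) or var_name in ['PATH', 'PYTHONPATH', 'LD_LIBRARY_PATH']:
--             categories["development_environment"].append(var_name)
--
--         # Container Runtime: Docker, services, container-specific
--         elif any(pattern in var_upper for pattern in [
--             'DOCKER_', 'CONTAINER_', 'SERVICE_', 'PORT', 'HOSTNAME'
--         ]) or var_name in ['TZ', 'DEBIAN_FRONTEND']: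
--             categories["container_runtime"].append(var_name)
--
--         # Authentication & Secrets: Tokens, keys, passwords
--         elif any(pattern in var_upper for pattern in [
--             'TOKEN', 'SECRET', 'KEY', 'PASSWORD', 'AUTH', 'CREDENTIAL', 'JWT_'
--         ]) and not any(exclusion in var_upper for exclusion in [
--             'BATCHED_TOKENS', 'MAX_TOKENS', 'NUM_TOKENS'  # Config, not auth
--         ]):
--             categories["authentication_secrets"].append(var_name)
--
--         # System Core: OS, shell, user, basic system
--         elif any(pattern in var_upper for pattern in [
--             'HOME', 'USER', 'SHELL', 'TERM', 'LANG', 'LC_', 'PWD', 'OLDPWD'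
--         ]) or var_name in ['SHELL', 'HOME', 'USER', 'LOGNAME', 'TERM']:
--             categories["system_core"].append(var_name)
--
--         # Everything else
--         else:
--             categories["other_applications"].append(var_name)
--
--     # Remove empty categories
--     return {k: v for k, v in categories.items() if v}
-- ===== SOURCE B (Python) =====
-- # Multi-pass sieve: instead of classifying each variable once through an
-- # if/elif chain, each category in priority order filters its members out of a
-- # shrinking pool of names; the leftover pool is "other_applications".
--
-- def _sieve(names, pred):
--     """Split names into (matching, rest), preserving order."""
--     keep, rest = [], []
--     for n in names:
--         (keep if pred(n) else rest).append(n)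
--     return keep, rest
--
--
-- def _is_tt(name):
--     u = name.upper()
--     return any(p in u for p in ('TT_', 'VLLM_', 'HF_', 'MODEL_', 'LLAMA_',
--                                 'MESH_', 'ARCH_', 'CACHE_', 'WH_',
--                                 'INFERENCE_', 'GPU_', 'CUDA_'))
--
--
-- def _is_dev(name):
--     u = name.upper()
--     return any(p in u for p in ('PYTHON', 'PIP_', 'CONDA_', 'VIRTUAL_', 'VENV',
--                                 '_ENV', 'GCC_', 'CC_', 'CXX_', 'CMAKE_',
--                                 'PKG_CONFIG', 'LIBRARY_', 'INCLUDE_', 'LD_',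
--                                 'LOGURU_', 'CONFIG')) \
--         or name in ('PATH', 'PYTHONPATH', 'LD_LIBRARY_PATH')
--
--
-- def _is_container(name):
--     u = name.upper()
--     return any(p in u for p in ('DOCKER_', 'CONTAINER_', 'SERVICE_', 'PORT',
--                                 'HOSTNAME')) or name in ('TZ', 'DEBIAN_FRONTEND')
--
--
-- def _is_auth(name):
--     u = name.upper()
--     return any(p in u for p in ('TOKEN', 'SECRET', 'KEY', 'PASSWORD', 'AUTH',
--                                 'CREDENTIAL', 'JWT_')) \
--         and not any(e in u for e in ('BATCHED_TOKENS', 'MAX_TOKENS', 'NUM_TOKENS'))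
--
--
-- def _is_system(name):
--     u = name.upper()
--     return any(p in u for p in ('HOME', 'USER', 'SHELL', 'TERM', 'LANG', 'LC_',
--                                 'PWD', 'OLDPWD')) \
--         or name in ('SHELL', 'HOME', 'USER', 'LOGNAME', 'TERM')
--
--
-- def categorize_environment_variables(env_vars):
--     remaining = list(env_vars)
--     tt, remaining = _sieve(remaining, _is_tt)
--     dev, remaining = _sieve(remaining, _is_dev)
--     cont, remaining = _sieve(remaining, _is_container)
--     auth, remaining = _sieve(remaining, _is_auth)
--     sys_, remaining = _sieve(remaining, _is_system)
--     result = {}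
--     for key, members in (("tt_inference_system", tt),
--                          ("development_environment", dev),
--                          ("container_runtime", cont),
--                          ("system_core", sys_),
--                          ("authentication_secrets", auth),
--                          ("other_applications", remaining)):
--         if members:
--             result[key] = members
--     return result
-- ===== Notes on version B (the rewrite author's own statement) =====
-- stated objective: alternative
-- what changed: Replaces A's single pass over the variables with a per-variable if/elif chain by a category-major multi-pass sieve: each category's standalone predicate filters its members out of a shrinking pool in priority order, the leftover pool becomes other_applications, and the result dict is assembled from the six buckets at the end.
import Mathlib
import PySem

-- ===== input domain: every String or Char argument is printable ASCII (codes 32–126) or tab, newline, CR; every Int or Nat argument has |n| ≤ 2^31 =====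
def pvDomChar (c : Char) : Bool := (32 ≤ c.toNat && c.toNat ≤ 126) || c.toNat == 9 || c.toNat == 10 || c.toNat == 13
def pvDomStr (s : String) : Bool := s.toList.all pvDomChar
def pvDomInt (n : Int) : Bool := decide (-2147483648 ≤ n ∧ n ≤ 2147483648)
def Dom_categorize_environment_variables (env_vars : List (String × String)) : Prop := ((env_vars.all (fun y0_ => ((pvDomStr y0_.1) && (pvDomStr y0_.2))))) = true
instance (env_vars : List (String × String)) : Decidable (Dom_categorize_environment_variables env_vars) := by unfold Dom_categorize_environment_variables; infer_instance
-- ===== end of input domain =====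

set_option maxHeartbeats 1600000


-- B replaces A's single pass with a per-variable if/elif chain by a category-major
-- multi-pass sieve: each category filters its members out of a shrinking pool
-- (objective: alternative, same cost).

-- ===== PORT A =====
-- state: the six category lists in dict-declaration order
-- (tt_inference_system, development_environment, container_runtime, system_core, authentication_secrets, other_applications)
def pvStepA (st : List String × List String × List String × List String × List String × List String)
    (var_name : String) :
    List String × List String × List String × List String × List String × List String :=
  let (t, d, c, s, a, o) := st
  let var_upper := PySem.Str.upper var_name
  if (["TT_", "VLLM_", "HF_", "MODEL_", "LLAMA_", "MESH_", "ARCH_",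
       "CACHE_", "WH_", "INFERENCE_", "GPU_", "CUDA_"].any
        (fun pattern => PySem.Str.isIn pattern var_upper)) then
    (t ++ [var_name], d, c, s, a, o)
  else if (["PYTHON", "PIP_", "CONDA_", "VIRTUAL_", "VENV", "_ENV",
            "GCC_", "CC_", "CXX_", "CMAKE_", "PKG_CONFIG", "LIBRARY_",
            "INCLUDE_", "LD_", "LOGURU_", "CONFIG"].any
             (fun pattern => PySem.Str.isIn pattern var_upper)
          || ["PATH", "PYTHONPATH", "LD_LIBRARY_PATH"].contains var_name) then
    (t, d ++ [var_name], c, s, a, o)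
  else if (["DOCKER_", "CONTAINER_", "SERVICE_", "PORT", "HOSTNAME"].any
             (fun pattern => PySem.Str.isIn pattern var_upper)
          || ["TZ", "DEBIAN_FRONTEND"].contains var_name) then
    (t, d, c ++ [var_name], s, a, o)
  else if (["TOKEN", "SECRET", "KEY", "PASSWORD", "AUTH", "CREDENTIAL", "JWT_"].any
             (fun pattern => PySem.Str.isIn pattern var_upper)
          && !(["BATCHED_TOKENS", "MAX_TOKENS", "NUM_TOKENS"].any
                (fun exclusion => PySem.Str.isIn exclusion var_upper))) then
    (t, d, c, s, a ++ [var_name], o)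
  else if (["HOME", "USER", "SHELL", "TERM", "LANG", "LC_", "PWD", "OLDPWD"].any
             (fun pattern => PySem.Str.isIn pattern var_upper)
          || ["SHELL", "HOME", "USER", "LOGNAME", "TERM"].contains var_name) then
    (t, d, c, s ++ [var_name], a, o)
  else
    (t, d, c, s, a, o ++ [var_name])

def categorize_environment_variables (env_vars : List (String × String)) : List (String × List String) :=
  -- env_vars is a Python dict: its keys are the distinct first components in order
  let keys := PySem.List.dedup (env_vars.map Prod.fst)
  let r := keys.foldl pvStepA ([], [], [], [], [], [])
  ([("tt_inference_system", r.1), ("development_environment", r.2.1),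
    ("container_runtime", r.2.2.1), ("system_core", r.2.2.2.1),
    ("authentication_secrets", r.2.2.2.2.1), ("other_applications", r.2.2.2.2.2)]).filter
      (fun kv => !kv.2.isEmpty)

-- ===== PORT B =====
-- _sieve: one pass splitting a pool into (matching, rest), order preserved
def pvSieve (names : List String) (pred : String → Bool) : List String × List String :=
  names.foldl (fun (st : List String × List String) n =>
    if pred n then (st.1 ++ [n], st.2) else (st.1, st.2 ++ [n])) ([], [])

def pvIsTT (name : String) : Bool :=
  let u := PySem.Str.upper name
  ["TT_", "VLLM_", "HF_", "MODEL_", "LLAMA_", "MESH_", "ARCH_",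
   "CACHE_", "WH_", "INFERENCE_", "GPU_", "CUDA_"].any (fun p => PySem.Str.isIn p u)

def pvIsDev (name : String) : Bool :=
  let u := PySem.Str.upper name
  (["PYTHON", "PIP_", "CONDA_", "VIRTUAL_", "VENV", "_ENV",
    "GCC_", "CC_", "CXX_", "CMAKE_", "PKG_CONFIG", "LIBRARY_",
    "INCLUDE_", "LD_", "LOGURU_", "CONFIG"].any (fun p => PySem.Str.isIn p u))
  || ["PATH", "PYTHONPATH", "LD_LIBRARY_PATH"].contains name

def pvIsContainer (name : String) : Bool :=
  let u := PySem.Str.upper name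
  (["DOCKER_", "CONTAINER_", "SERVICE_", "PORT", "HOSTNAME"].any (fun p => PySem.Str.isIn p u))
  || ["TZ", "DEBIAN_FRONTEND"].contains name

def pvIsAuth (name : String) : Bool :=
  let u := PySem.Str.upper name
  (["TOKEN", "SECRET", "KEY", "PASSWORD", "AUTH", "CREDENTIAL", "JWT_"].any
     (fun p => PySem.Str.isIn p u))
  && !(["BATCHED_TOKENS", "MAX_TOKENS", "NUM_TOKENS"].any (fun e => PySem.Str.isIn e u))

def pvIsSystem (name : String) : Bool :=
  let u := PySem.Str.upper name
  (["HOME", "USER", "SHELL", "TERM", "LANG", "LC_", "PWD", "OLDPWD"].any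
     (fun p => PySem.Str.isIn p u))
  || ["SHELL", "HOME", "USER", "LOGNAME", "TERM"].contains name

def categorize_environment_variables_alt (env_vars : List (String × String)) : List (String × List String) :=
  let remaining0 := PySem.List.dedup (env_vars.map Prod.fst)
  let (tt, r1) := pvSieve remaining0 pvIsTT
  let (dev, r2) := pvSieve r1 pvIsDev
  let (cont, r3) := pvSieve r2 pvIsContainer
  let (auth, r4) := pvSieve r3 pvIsAuth
  let (sys_, remaining) := pvSieve r4 pvIsSystem
  ([("tt_inference_system", tt), ("development_environment", dev),
    ("container_runtime", cont), ("system_core", sys_),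
    ("authentication_secrets", auth), ("other_applications", remaining)]).foldl
      (fun result kv => if !kv.2.isEmpty then result ++ [kv] else result) []

-- ===== PRECONDITION & SPEC =====
def Spec_categorize_environment_variables (env_vars : List (String × String)) (out : List (String × List String)) : Prop := out = categorize_environment_variables_alt env_vars
instance (env_vars : List (String × String)) (out : List (String × List String)) : Decidable (Spec_categorize_environment_variables env_vars out) := by unfold Spec_categorize_environment_variables; infer_instance

-- ===== CLAIM (what is proved, stated in full; the proofs are below) =====
def Claim_equal_categorize_environment_variables : Prop := ∀ (env_vars : List (String × String)), Dom_categorize_environment_variables env_vars → Spec_categorize_environment_variables env_vars (categorize_environment_variables env_vars)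

-- ===== LEMMAS AND PROOFS =====

-- proof-side classifier: the first category whose condition holds
def pvClassify (n : String) : String :=
  if pvIsTT n then "tt_inference_system"
  else if pvIsDev n then "development_environment"
  else if pvIsContainer n then "container_runtime"
  else if pvIsAuth n then "authentication_secrets"
  else if pvIsSystem n then "system_core"
  else "other_applications"

theorem pvClassify_cases (n : String) :
    pvClassify n = "tt_inference_system" ∨ pvClassify n = "development_environment" ∨
    pvClassify n = "container_runtime" ∨ pvClassify n = "authentication_secrets" ∨
    pvClassify n = "system_core" ∨ pvClassify n = "other_applications" := by
  unfold pvClassify; split_ifs <;> simp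

theorem pvStepA_chain (st : List String × List String × List String × List String × List String × List String)
    (n : String) :
    pvStepA st n =
      (if pvIsTT n then (st.1 ++ [n], st.2.1, st.2.2.1, st.2.2.2.1, st.2.2.2.2.1, st.2.2.2.2.2)
       else if pvIsDev n then (st.1, st.2.1 ++ [n], st.2.2.1, st.2.2.2.1, st.2.2.2.2.1, st.2.2.2.2.2)
       else if pvIsContainer n then (st.1, st.2.1, st.2.2.1 ++ [n], st.2.2.2.1, st.2.2.2.2.1, st.2.2.2.2.2)
       else if pvIsAuth n then (st.1, st.2.1, st.2.2.1, st.2.2.2.1, st.2.2.2.2.1 ++ [n], st.2.2.2.2.2)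
       else if pvIsSystem n then (st.1, st.2.1, st.2.2.1, st.2.2.2.1 ++ [n], st.2.2.2.2.1, st.2.2.2.2.2)
       else (st.1, st.2.1, st.2.2.1, st.2.2.2.1, st.2.2.2.2.1, st.2.2.2.2.2 ++ [n])) := by
  obtain ⟨t, d, c, s, a, o⟩ := st
  simp only [pvStepA, pvIsTT, pvIsDev, pvIsContainer, pvIsAuth, pvIsSystem]

theorem pvStepA_eq (st : List String × List String × List String × List String × List String × List String)
    (n : String) :
    pvStepA st n =
      (if pvClassify n = "tt_inference_system" then (st.1 ++ [n], st.2.1, st.2.2.1, st.2.2.2.1, st.2.2.2.2.1, st.2.2.2.2.2)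
       else if pvClassify n = "development_environment" then (st.1, st.2.1 ++ [n], st.2.2.1, st.2.2.2.1, st.2.2.2.2.1, st.2.2.2.2.2)
       else if pvClassify n = "container_runtime" then (st.1, st.2.1, st.2.2.1 ++ [n], st.2.2.2.1, st.2.2.2.2.1, st.2.2.2.2.2)
       else if pvClassify n = "authentication_secrets" then (st.1, st.2.1, st.2.2.1, st.2.2.2.1, st.2.2.2.2.1 ++ [n], st.2.2.2.2.2)
       else if pvClassify n = "system_core" then (st.1, st.2.1, st.2.2.1, st.2.2.2.1 ++ [n], st.2.2.2.2.1, st.2.2.2.2.2)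
       else (st.1, st.2.1, st.2.2.1, st.2.2.2.1, st.2.2.2.2.1, st.2.2.2.2.2 ++ [n])) := by
  rw [pvStepA_chain]
  unfold pvClassify
  by_cases h1 : pvIsTT n = true <;>
  by_cases h2 : pvIsDev n = true <;>
  by_cases h3 : pvIsContainer n = true <;>
  by_cases h4 : pvIsAuth n = true <;>
  by_cases h5 : pvIsSystem n = true <;>
    simp only [h1, h2, h3, h4, h5, if_true, if_false, Bool.false_eq_true, String.reduceEq]

def pvF (k : String) (l : List String) : List String := l.filter (fun n => pvClassify n == k)

theorem pvFoldl_stepA (l : List String) :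
    ∀ t d c s a o, l.foldl pvStepA (t, d, c, s, a, o) =
      (t ++ pvF "tt_inference_system" l, d ++ pvF "development_environment" l,
       c ++ pvF "container_runtime" l, s ++ pvF "system_core" l,
       a ++ pvF "authentication_secrets" l, o ++ pvF "other_applications" l) := by
  induction l with
  | nil => intro t d c s a o; simp [pvF]
  | cons n l ih =>
    intro t d c s a o
    simp only [List.foldl_cons, pvStepA_eq]
    rcases pvClassify_cases n with h | h | h | h | h | h <;>
      simp [h, ih, pvF, List.append_assoc]

-- the sieve is the pair of filters
theorem pvSieve_eq (l : List String) (p : String → Bool) :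
    pvSieve l p = (l.filter p, l.filter (fun n => !p n)) := by
  suffices h : ∀ k r, l.foldl (fun (st : List String × List String) n =>
      if p n then (st.1 ++ [n], st.2) else (st.1, st.2 ++ [n])) (k, r)
      = (k ++ l.filter p, r ++ l.filter (fun n => !p n)) by
    simpa [pvSieve] using h [] []
  induction l with
  | nil => intro k r; simp
  | cons n l ih =>
    intro k r
    by_cases h : p n = true <;> simp [h, ih]

-- pointwise: each stage's combined condition is membership in that category
theorem pvPt1 (n : String) : pvIsTT n = (pvClassify n == "tt_inference_system") := by
  unfold pvClassify; split_ifs <;> simp_all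
theorem pvPt2 (n : String) : (pvIsDev n && !pvIsTT n) = (pvClassify n == "development_environment") := by
  unfold pvClassify; split_ifs <;> simp_all
theorem pvPt3 (n : String) : (pvIsContainer n && (!pvIsDev n && !pvIsTT n)) = (pvClassify n == "container_runtime") := by
  unfold pvClassify; split_ifs <;> simp_all
theorem pvPt4 (n : String) : (pvIsAuth n && (!pvIsContainer n && (!pvIsDev n && !pvIsTT n))) = (pvClassify n == "authentication_secrets") := by
  unfold pvClassify; split_ifs <;> simp_all
theorem pvPt5 (n : String) : (pvIsSystem n && (!pvIsAuth n && (!pvIsContainer n && (!pvIsDev n && !pvIsTT n)))) = (pvClassify n == "system_core") := by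
  unfold pvClassify; split_ifs <;> simp_all
theorem pvPt6 (n : String) : (!pvIsSystem n && (!pvIsAuth n && (!pvIsContainer n && (!pvIsDev n && !pvIsTT n)))) = (pvClassify n == "other_applications") := by
  unfold pvClassify; split_ifs <;> simp_all

-- B's assembly loop is a filter of the six buckets
theorem pvFoldl_filter (kvs : List (String × List String)) :
    kvs.foldl (fun result kv => if !kv.2.isEmpty then result ++ [kv] else result) []
      = kvs.filter (fun kv => !kv.2.isEmpty) := by
  suffices h : ∀ acc, kvs.foldl (fun result kv => if !kv.2.isEmpty then result ++ [kv] else result) acc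
      = acc ++ kvs.filter (fun kv => !kv.2.isEmpty) by simpa using h []
  induction kvs with
  | nil => intro acc; simp
  | cons kv kvs ih =>
    intro acc
    rw [List.foldl_cons, ih, List.filter_cons]
    by_cases h : kv.2.isEmpty = true <;> simp [h, List.append_assoc]

-- ===== VERDICT (by name: the statement is the Claim_ definition above) =====
theorem categorize_environment_variables_spec : Claim_equal_categorize_environment_variables := by
  intro env_vars _
  unfold Spec_categorize_environment_variables
  unfold categorize_environment_variables categorize_environment_variables_alt
  simp only [pvFoldl_stepA, pvSieve_eq, List.filter_filter, List.nil_append,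
    pvFoldl_filter, pvF]
  simp only [pvPt6]
  simp only [pvPt5]
  simp only [pvPt4]
  simp only [pvPt3]
  simp only [pvPt2]
  rw [funext pvPt1]
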